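-- pv_equiv track=rewrite | github.com/zubie7a/Algorithms | CodeSignal/Arcade/Intro/Level_03/04_Sort_By_Height.py | sortByHeight
-- ===== SOURCE A (Python) =====
-- def sortByHeight(heights):
--     # There's people in a park. Sort them by height and place them
--     # in between the trees in the park (marked by -1).
--     # First filter the people out from the trees and sort them.
--     people = sorted(filter(lambda x: x != -1, heights))
--     people_index = 0
--     # Then put back sorted people at the slots between trees.
--     for i in range(len(heights)):
--         # Leave trees quiet.
--         if heights[i] != -1:
--             heights[i] = people[people_index]
--             people_index += 1
--
--     return heights
-- ===== SOURCE B (Python) =====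
-- def _push(res, v):
--     # Insert person v into res (trees fixed, people already sorted):
--     # carry-scan that shifts every person greater than the carry one
--     # person-slot to the right, then drops the carry in the freed slot.
--     out = []
--     c = v
--     for x in res:
--         if x == -1 or x <= c:
--             out.append(x)
--         else:
--             out.append(c)
--             c = x
--     out.append(c)
--     return out
--
--
-- def sortByHeight(heights):
--     # Gapped insertion sort: grow the answer one element at a time,
--     # inserting each person into its sorted place among the people seen so
--     # far (trees stay where they are); no separate sort or write-back pass.
--     res = []
--     for v in heights:
--         if v == -1:
--             res.append(-1)
--         else:
--             res = _push(res, v)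
--     heights[:] = res
--     return heights
-- ===== Notes on version B (the rewrite author's own statement) =====
-- stated objective: alternative
-- what changed: Replaces A's sort-then-write-back (sort the filtered people, then overwrite non-tree slots with a counter) by a gapped insertion sort: the answer is grown element by element and each person is inserted into its sorted place among the people seen so far by a carry-scan; there is no separate sort and no write-back pass.
import Mathlib
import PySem

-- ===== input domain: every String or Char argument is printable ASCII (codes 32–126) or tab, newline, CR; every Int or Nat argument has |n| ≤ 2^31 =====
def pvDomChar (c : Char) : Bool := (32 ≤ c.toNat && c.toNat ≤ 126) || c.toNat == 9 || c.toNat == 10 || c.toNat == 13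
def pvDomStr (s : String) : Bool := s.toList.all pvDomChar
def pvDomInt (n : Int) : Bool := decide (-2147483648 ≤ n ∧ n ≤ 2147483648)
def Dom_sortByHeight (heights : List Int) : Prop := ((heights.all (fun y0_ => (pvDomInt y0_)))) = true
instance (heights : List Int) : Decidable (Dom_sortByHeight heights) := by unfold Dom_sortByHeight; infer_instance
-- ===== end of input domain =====

-- B replaces A's sort-then-write-back by a gapped insertion sort (each person is
-- inserted into its sorted place among the people seen so far; trees stay put);
-- both Pythons mutate the input list in place the same way, the equivalence
-- proved is about the return value.


-- ===== PORT A =====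
-- the index loop `for i in range(len(heights)): if heights[i] != -1: heights[i] = people[people_index]; people_index += 1`
-- as structural recursion over the list carrying the remaining `people`; already-written cells are never re-read by the
-- loop, so walking the list is exact.  `people[people_index]` never goes out of range in A (people has exactly as many
-- elements as non-tree slots), so `headD 0` is exact on every input A returns on.
def pvFillA : List Int → List Int → List Int
  | [], _ => []
  | x :: t, ps => if x != -1 then ps.headD 0 :: pvFillA t ps.tail else x :: pvFillA t ps

def sortByHeight (heights : List Int) : List Int :=
  let people := PySem.List.sorted (heights.filter (fun x => x != -1)) (fun x => x) false
  pvFillA heights people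

-- ===== PORT B =====
-- _push: the carry-scan `for x in res: if x == -1 or x <= c: out.append(x) else: out.append(c); c = x` + final append
def pvPush : List Int → Int → List Int
  | [], c => [c]
  | x :: t, c => if x == -1 || x ≤ c then x :: pvPush t c else c :: pvPush t x

def sortByHeight_alt (heights : List Int) : List Int :=
  heights.foldl (fun res v => if v == -1 then res ++ [-1] else pvPush res v) []

-- ===== PRECONDITION & SPEC =====
def Spec_sortByHeight (heights : List Int) (out : List Int) : Prop := out = sortByHeight_alt heights
instance (heights : List Int) (out : List Int) : Decidable (Spec_sortByHeight heights out) := by unfold Spec_sortByHeight; infer_instance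

-- ===== CLAIM (what is proved, stated in full; the proofs are below) =====
def Claim_equal_sortByHeight : Prop := ∀ (heights : List Int), Dom_sortByHeight heights → Spec_sortByHeight heights (sortByHeight heights)

-- ===== LEMMAS AND PROOFS =====

-- ordered insert (proof-side characterisation of what pvPush does to the people)
def pvIns (v : Int) : List Int → List Int
  | [] => [v]
  | x :: t => if x ≤ v then x :: pvIns v t else v :: x :: t

theorem pvMemIns (v y : Int) (l : List Int) : y ∈ pvIns v l ↔ y = v ∨ y ∈ l := by
  induction l with
  | nil => simp [pvIns]
  | cons x t ih =>
    by_cases h : x ≤ v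
    · simp [pvIns, h, ih]; tauto
    · simp [pvIns, h]

theorem pvInsPerm (v : Int) (l : List Int) : (pvIns v l).Perm (v :: l) := by
  induction l with
  | nil => simp [pvIns]
  | cons x t ih =>
    by_cases h : x ≤ v
    · simp only [pvIns, h, if_pos]
      exact (ih.cons x).trans (List.Perm.swap v x t)
    · simp [pvIns, h]

theorem pvInsPairwise (v : Int) (l : List Int) (hl : l.Pairwise (· ≤ ·)) :
    (pvIns v l).Pairwise (· ≤ ·) := by
  induction l with
  | nil => simp [pvIns]
  | cons x t ih =>
    rw [List.pairwise_cons] at hl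
    obtain ⟨hx, ht⟩ := hl
    by_cases h : x ≤ v
    · simp only [pvIns, h, if_pos, List.pairwise_cons]
      refine ⟨fun y hy => ?_, ih ht⟩
      rcases (pvMemIns v y t).mp hy with rfl | hy
      · exact h
      · exact hx y hy
    · have hvx : v < x := not_le.mp h
      simp only [pvIns, if_neg h, List.pairwise_cons]
      refine ⟨fun y hy => ?_, hx, ht⟩
      rcases List.mem_cons.mp hy with hyx | hy
      · exact hyx ▸ le_of_lt hvx
      · exact le_of_lt (lt_of_lt_of_le hvx (hx y hy))

-- inserting a lower bound just conses it on
theorem pvInsLow (v : Int) (l : List Int) (h : ∀ y ∈ l, v ≤ y) : pvIns v l = v :: l := by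
  induction l with
  | nil => rfl
  | cons x t ih =>
    by_cases hx : x ≤ v
    · have hvx : v ≤ x := h x (by simp)
      have : x = v := le_antisymm hx hvx
      subst this
      simp only [pvIns, le_refl, if_pos]
      rw [ih (fun y hy => h y (by simp [hy]))]
    · simp [pvIns, hx]

-- A's fill distributes over append, consuming one person per non-tree slot
theorem pvFillAppend (h g ps : List Int) :
    pvFillA (h ++ g) ps = pvFillA h ps ++ pvFillA g (ps.drop (h.countP (fun x => x != -1))) := by
  induction h generalizing ps with
  | nil => simp [pvFillA]
  | cons x t ih =>
    by_cases hx : x != -1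
    · simp only [List.cons_append, pvFillA, if_pos, List.countP_cons, hx, List.cons.injEq,
        true_and]
      rw [ih]
      congr 2
      rw [← List.drop_one, List.drop_drop]
      congr 1
      omega
    · have hx' : (x != -1) = false := by simpa using hx
      simp [List.cons_append, pvFillA, hx', ih]

-- the heart: pushing person v through A's filled list inserts v among the people
theorem pvPushFill (h : List Int) (ps : List Int) (v w : Int)
    (hlen : ps.length = h.countP (fun x => x != -1))
    (hps : ∀ p ∈ ps, p ≠ -1)
    (hsort : ps.Pairwise (· ≤ ·))
    (hv : v ≠ -1) (hw : w ≠ -1) :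
    pvPush (pvFillA h ps) v = pvFillA (h ++ [w]) (pvIns v ps) := by
  induction h generalizing ps v with
  | nil =>
    have : ps = [] := by simpa using hlen
    subst this
    simp [pvFillA, pvPush, pvIns, hw]
  | cons x t ih =>
    by_cases hx : x != -1
    · -- person slot: ps = p :: ps'
      rw [List.countP_cons, if_pos hx] at hlen
      cases ps with
      | nil => simp at hlen
      | cons p ps' =>
        have hp : p ≠ -1 := hps p (by simp)
        rw [List.pairwise_cons] at hsort
        obtain ⟨hple, hsort'⟩ := hsort
        have hlen' : ps'.length = t.countP (fun x => x != -1) := by simpa using hlen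
        have hps' : ∀ q ∈ ps', q ≠ -1 := fun q hq => hps q (by simp [hq])
        simp only [pvFillA, hx, if_pos, List.headD, List.tail, List.cons_append]
        by_cases hpv : p ≤ v
        · have hpne : (p == -1) = false := by simpa using hp
          simp only [pvPush, hpne, Bool.false_or, hpv, if_pos, pvIns, decide_true]
          rw [ih ps' v hlen' hps' hsort' hv]
        · have hpne : (p == -1) = false := by simpa using hp
          have hcond : ((p == -1) || decide (p ≤ v)) = false := by simp [hpne, hpv]
          simp only [pvPush, hcond, Bool.false_eq_true, if_false]
          rw [ih ps' p hlen' hps' hsort' hp]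
          rw [pvInsLow p ps' hple]
          have : pvIns v (p :: ps') = v :: p :: ps' := by
            simp [pvIns, hpv]
          rw [this]
    · -- tree slot
      have hx' : (x != -1) = false := by simpa using hx
      have hxm : x = -1 := by simpa using hx'
      rw [List.countP_cons, if_neg (by simp [hx'])] at hlen
      simp only [pvFillA, hx', Bool.false_eq_true, if_false, List.cons_append]
      subst hxm
      simp only [pvPush, BEq.rfl, Bool.true_or, if_pos]
      rw [ih ps v (by simpa using hlen) hps hsort hv]

-- facts about A's sorted people list
theorem pvSpLen (h : List Int) :
    (PySem.List.sorted (h.filter (fun x => x != -1)) (fun x => x) false).length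
      = h.countP (fun x => x != -1) := by
  rw [PySem.List.length_sorted, ← List.countP_eq_length_filter]

theorem pvSpMem (h : List Int) (p : Int)
    (hp : p ∈ PySem.List.sorted (h.filter (fun x => x != -1)) (fun x => x) false) : p ≠ -1 := by
  rw [PySem.List.mem_sorted, List.mem_filter] at hp
  simpa using hp.2

-- appending a person to the input inserts it into the sorted people list
theorem pvSpSnoc (h : List Int) (v : Int) (hv : v ≠ -1) :
    PySem.List.sorted ((h ++ [v]).filter (fun x => x != -1)) (fun x => x) false
      = pvIns v (PySem.List.sorted (h.filter (fun x => x != -1)) (fun x => x) false) := by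
  have hvb : (v != -1) = true := by simpa using hv
  have hfil : (h ++ [v]).filter (fun x => x != -1) = h.filter (fun x => x != -1) ++ [v] := by
    simp [List.filter_append, hvb]
  rw [hfil]
  apply PySem.List.sorted_id_eq_of_perm_of_pairwise
  · exact (pvInsPerm v _).trans
      (((PySem.List.sorted_perm _ _ _).cons v).trans (List.perm_append_singleton v _).symm)
  · exact pvInsPairwise v _
      (by simpa using PySem.List.sorted_pairwise (xs := h.filter (fun x => x != -1)) (key := fun x => x))

-- B's fold equals A's fill with the sorted people, by induction from the right
theorem pvAltEq (h : List Int) :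
    sortByHeight_alt h
      = pvFillA h (PySem.List.sorted (h.filter (fun x => x != -1)) (fun x => x) false) := by
  induction h using List.reverseRecOn with
  | nil => rfl
  | append_singleton h' x ih =>
    unfold sortByHeight_alt at ih ⊢
    rw [List.foldl_append, List.foldl_cons, List.foldl_nil, ih]
    by_cases hx : x = -1
    · subst hx
      simp only [BEq.rfl, if_pos]
      have hf : (h' ++ [(-1 : Int)]).filter (fun x => x != -1) = h'.filter (fun x => x != -1) := by
        simp [List.filter_append]
      rw [hf, pvFillAppend]
      simp [pvFillA]
    · have hxb : (x == -1) = false := by simpa using hx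
      simp only [hxb, Bool.false_eq_true, if_false]
      rw [pvPushFill h' _ x x (pvSpLen h') (pvSpMem h')
        (by simpa using PySem.List.sorted_pairwise (xs := h'.filter (fun x => x != -1)) (key := fun x => x))
        hx hx, pvSpSnoc h' x hx]

-- ===== VERDICT (by name: the statement is the Claim_ definition above) =====
theorem sortByHeight_spec : Claim_equal_sortByHeight := by
  intro h _
  unfold Spec_sortByHeight
  rw [pvAltEq]
  rfl
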